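-- pv_equiv track=rewrite | github.com/jhillierdavis/advent-of-code-solutions | aoc-2020/aoc-2020-day-10/solution-in-python3/solution.py | get_jolt_diffs
-- ===== SOURCE A (Python) =====
-- def get_jolt_diffs(adaptor_list:list, increment:int) -> int:
--     count = 0
--     prior_value = 0
--     for a in adaptor_list:
--         diff = a - prior_value
--         if diff == increment:
--             count += 1
--         prior_value = a
--     return count
-- ===== SOURCE B (Python) =====
-- def get_jolt_diffs(adaptor_list: list, increment: int) -> int:
--     # Divide and conquer: prepend the 0-jolt outlet, then count matching steps in
--     # chain[lo..hi] by splitting the segment at its midpoint and summing both halves.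
--     chain = [0] + adaptor_list
--     def count(lo, hi):
--         if hi <= lo:
--             return 0
--         if hi == lo + 1:
--             return 1 if chain[hi] - chain[lo] == increment else 0
--         mid = (lo + hi) // 2
--         return count(lo, mid) + count(mid, hi)
--     return count(0, len(chain) - 1)
-- ===== Notes on version B (the rewrite author's own statement) =====
-- stated objective: alternative
-- what changed: Replaces A's single left-to-right loop carrying a counter and prior-value state by a divide-and-conquer recursion over index segments of the 0-prepended chain: a segment's count is the sum of its two halves' counts, with a direct comparison at unit segments.
import Mathlib
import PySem

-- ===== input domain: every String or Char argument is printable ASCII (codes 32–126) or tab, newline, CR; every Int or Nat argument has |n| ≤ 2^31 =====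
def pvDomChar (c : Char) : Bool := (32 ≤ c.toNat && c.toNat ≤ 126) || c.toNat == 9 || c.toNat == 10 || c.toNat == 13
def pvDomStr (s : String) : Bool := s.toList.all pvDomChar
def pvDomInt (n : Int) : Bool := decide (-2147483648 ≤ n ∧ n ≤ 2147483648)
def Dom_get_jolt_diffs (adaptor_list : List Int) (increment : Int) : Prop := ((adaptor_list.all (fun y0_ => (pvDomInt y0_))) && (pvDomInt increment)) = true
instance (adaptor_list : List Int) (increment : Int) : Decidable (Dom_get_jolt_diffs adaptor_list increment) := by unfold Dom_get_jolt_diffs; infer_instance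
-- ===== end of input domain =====

-- B replaces A's single left-to-right counter/prior-value loop by a divide-and-conquer recursion over index segments of the 0-prepended chain (alternative decomposition, same cost).

-- ===== PORT A =====
def get_jolt_diffs (adaptor_list : List Int) (increment : Int) : Int :=
  (adaptor_list.foldl
    (fun (st : Int × Int) a =>
      let diff := a - st.2
      (if diff = increment then st.1 + 1 else st.1, a))
    (0, 0)).1

-- ===== PORT B =====
-- helper: Python's inner `count(lo, hi)`; `chain[i]` is ported as `chain.getD i 0`,
-- exact here because every index used (lo and hi with lo < hi ≤ len chain - 1) is in range.
def countSeg (chain : List Int) (increment : Int) (lo hi : Nat) : Int :=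
  if hi ≤ lo then 0
  else if hi = lo + 1 then
    (if chain.getD hi 0 - chain.getD lo 0 = increment then 1 else 0)
  else
    countSeg chain increment lo ((lo + hi) / 2) + countSeg chain increment ((lo + hi) / 2) hi
termination_by hi - lo
decreasing_by all_goals omega

def get_jolt_diffs_alt (adaptor_list : List Int) (increment : Int) : Int :=
  let chain := 0 :: adaptor_list
  countSeg chain increment 0 (chain.length - 1)

-- ===== PRECONDITION & SPEC =====
def Spec_get_jolt_diffs (adaptor_list : List Int) (increment : Int) (out : Int) : Prop := out = get_jolt_diffs_alt adaptor_list increment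
instance (adaptor_list : List Int) (increment : Int) (out : Int) : Decidable (Spec_get_jolt_diffs adaptor_list increment out) := by unfold Spec_get_jolt_diffs; infer_instance

-- ===== CLAIM (what is proved, stated in full; the proofs are below) =====
def Claim_equal_get_jolt_diffs : Prop := ∀ (adaptor_list : List Int) (increment : Int), Dom_get_jolt_diffs adaptor_list increment → Spec_get_jolt_diffs adaptor_list increment (get_jolt_diffs adaptor_list increment)

-- ===== LEMMAS AND PROOFS =====

-- score of the step ending at index i+1 of the chain
def stepAt (chain : List Int) (inc : Int) (i : Nat) : Int :=
  if chain.getD (i + 1) 0 - chain.getD i 0 = inc then 1 else 0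

theorem range'_shift (s n : Nat) : List.range' (s + 1) n = (List.range' s n).map (· + 1) := by
  induction n generalizing s with
  | zero => simp
  | succ n ih => simp [List.range'_succ, ih]

-- B's divide-and-conquer equals the sum of the step scores over its index segment.
theorem countSeg_eq_sum (chain : List Int) (inc : Int) (lo hi : Nat) :
    countSeg chain inc lo hi = ((List.range' lo (hi - lo)).map (stepAt chain inc)).sum := by
  by_cases h1 : hi ≤ lo
  · rw [countSeg, if_pos h1]
    simp [show hi - lo = 0 by omega]
  · by_cases h2 : hi = lo + 1
    · rw [countSeg, if_neg h1, if_pos h2]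
      subst h2
      simp [show lo + 1 - lo = 1 by omega, stepAt]
    · rw [countSeg, if_neg h1, if_neg h2,
          countSeg_eq_sum chain inc lo ((lo + hi) / 2),
          countSeg_eq_sum chain inc ((lo + hi) / 2) hi]
      have hmid : lo < (lo + hi) / 2 ∧ (lo + hi) / 2 < hi := by omega
      obtain ⟨m, hm⟩ : ∃ m, (lo + hi) / 2 = m := ⟨_, rfl⟩
      rw [hm] at hmid ⊢
      have hsplit : hi - lo = (m - lo) + (hi - m) := by omega
      rw [hsplit, ← List.range'_append,
          show lo + 1 * (m - lo) = m by omega, List.map_append, List.sum_append]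
termination_by hi - lo
decreasing_by all_goals omega

-- A's loop started at (c, prior) equals c plus the step-score sum over the (prior :: xs) chain.
theorem foldA_eq_sum (inc : Int) (xs : List Int) (c prior : Int) :
    (xs.foldl
      (fun (st : Int × Int) a =>
        let diff := a - st.2
        (if diff = inc then st.1 + 1 else st.1, a))
      (c, prior)).1
    = c + ((List.range' 0 xs.length).map (stepAt (prior :: xs) inc)).sum := by
  induction xs generalizing c prior with
  | nil => simp
  | cons x xs ih =>
    simp only [List.foldl_cons, List.length_cons]
    rw [ih]
    have hr : List.range' 0 (xs.length + 1) = 0 :: List.range' 1 xs.length := by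
      simp [List.range'_succ]
    have hshift : (List.range' 1 xs.length).map (stepAt (prior :: x :: xs) inc)
        = (List.range' 0 xs.length).map (stepAt (x :: xs) inc) := by
      rw [show (1 : Nat) = 0 + 1 from rfl, range'_shift, List.map_map]
      rfl
    rw [hr, List.map_cons, List.sum_cons, hshift]
    have h0 : stepAt (prior :: x :: xs) inc 0 = (if x - prior = inc then 1 else 0) := by
      simp [stepAt]
    rw [h0]
    by_cases h : x - prior = inc <;> simp [h] <;> omega

-- ===== VERDICT (by name: the statement is the Claim_ definition above) =====
theorem get_jolt_diffs_spec : Claim_equal_get_jolt_diffs := by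
  intro adaptor_list increment _
  unfold Spec_get_jolt_diffs get_jolt_diffs get_jolt_diffs_alt
  simp only [List.length_cons, Nat.add_sub_cancel]
  rw [foldA_eq_sum, countSeg_eq_sum]
  simp
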